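-- pv_equiv track=rewrite | github.com/Cind3r/CLEAR | scripts/bundle_validation.py | _join_sorted_alternation
-- ===== SOURCE A (Python) =====
-- from typing import Dict, List, Tuple
--
-- def _alt_sort_key(tok: str) -> str:
--     """Sort key for an alternation token: strip \b and backslashes, lowercase."""
--     t = tok
--     t = t.replace(r"\b", "")
--     t = t.replace("\\", "")
--     return t.strip().lower()
--
-- def _join_sorted_alternation(tokens: List[str]) -> str:
--     # Remove empties, dedupe while preserving original token content
--     toks = [t for t in (tok.strip() for tok in tokens) if t]
--     # Dedupe by normalized sort key
--     seen = {}
--     for t in toks: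
--         k = _alt_sort_key(t)
--         if k not in seen:
--             seen[k] = t
--     toks_unique = list(seen.values())
--     toks_sorted = sorted(toks_unique, key=_alt_sort_key)
--     return "|".join(toks_sorted)
-- ===== SOURCE B (Python) =====
-- from typing import List
--
-- def _alt_sort_key(tok: str) -> str:
--     t = tok
--     t = t.replace(r"\b", "")
--     t = t.replace("\\", "")
--     return t.strip().lower()
--
-- def _join_sorted_alternation(tokens: List[str]) -> str:
--     # Sort first (stable), then keep the first token of each run of equal keys.
--     toks = sorted((t for t in (tok.strip() for tok in tokens) if t), key=_alt_sort_key)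
--     out = []
--     prev = None
--     for t in toks:
--         k = _alt_sort_key(t)
--         if prev != k:
--             out.append(t)
--             prev = k
--     return "|".join(out)
-- ===== Notes on version B (the rewrite author's own statement) =====
-- stated objective: simpler
-- what changed: Replaces A's dict-based dedup-then-sort decomposition with sort-first-then-collapse-runs: one stable sort of all stripped tokens followed by a single linear pass that keeps the first token of each run of equal normalized keys.
import Mathlib
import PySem

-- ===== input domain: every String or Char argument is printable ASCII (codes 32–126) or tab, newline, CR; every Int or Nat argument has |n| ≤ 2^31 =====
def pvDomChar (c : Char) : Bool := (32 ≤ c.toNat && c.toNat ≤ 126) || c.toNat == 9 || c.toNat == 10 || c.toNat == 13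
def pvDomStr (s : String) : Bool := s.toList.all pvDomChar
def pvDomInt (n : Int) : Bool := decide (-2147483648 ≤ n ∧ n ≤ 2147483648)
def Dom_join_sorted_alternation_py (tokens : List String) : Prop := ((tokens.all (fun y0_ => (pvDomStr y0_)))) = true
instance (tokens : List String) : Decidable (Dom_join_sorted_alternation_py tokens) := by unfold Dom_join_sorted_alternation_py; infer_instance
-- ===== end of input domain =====

-- B replaces A's dict-dedup-then-sort decomposition with sort-first-then-collapse-runs (one stable sort, then a single pass keeping the first token of each equal-key run); return values proved equal on all inputs.

-- ===== PORT A =====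
-- shared module helper _alt_sort_key
def altSortKey (tok : String) : String :=
  PySem.Str.lower (PySem.Str.strip (PySem.Str.replace (PySem.Str.replace tok "\\b" "") "\\" ""))

def join_sorted_alternation_py (tokens : List String) : String :=
  let toks := (tokens.map PySem.Str.strip).filter (fun t => t != "")
  let seen := toks.foldl (fun (d : PySem.Dict String String) t =>
      let k := altSortKey t
      if !(d.contains k) then d.insert k t else d) (PySem.Dict.mk [])
  let toksUnique := seen.values
  let toksSorted := PySem.List.sorted toksUnique altSortKey
  PySem.Str.join "|" toksSorted

-- ===== PORT B =====
-- the for-loop of B: walk down the sorted list keeping each token whose key differs from the previous element's key (prev)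
def collapseFirsts (prev : Option String) : List String → List String
  | [] => []
  | t :: rest =>
    let k := altSortKey t
    if prev = some k then collapseFirsts prev rest
    else t :: collapseFirsts (some k) rest

def join_sorted_alternation_py_alt (tokens : List String) : String :=
  let toks := PySem.List.sorted ((tokens.map PySem.Str.strip).filter (fun t => t != "")) altSortKey
  PySem.Str.join "|" (collapseFirsts none toks)

-- ===== PRECONDITION & SPEC =====
def Spec_join_sorted_alternation_py (tokens : List String) (out : String) : Prop := out = join_sorted_alternation_py_alt tokens
instance (tokens : List String) (out : String) : Decidable (Spec_join_sorted_alternation_py tokens out) := by unfold Spec_join_sorted_alternation_py; infer_instance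

-- ===== CLAIM (what is proved, stated in full; the proofs are below) =====
def Claim_equal_join_sorted_alternation_py : Prop := ∀ (tokens : List String), Dom_join_sorted_alternation_py tokens → Spec_join_sorted_alternation_py tokens (join_sorted_alternation_py tokens)

-- ===== LEMMAS AND PROOFS =====

-- first token per normalized key, skipping keys in ks (describes what A's dict fold collects)

def fkAvoid (ks : List String) : List String → List String
  | [] => []
  | t :: rest =>
    if ks.any (fun s => s == altSortKey t) then fkAvoid ks rest
    else t :: fkAvoid (altSortKey t :: ks) rest

theorem fkAvoid_congr (ks ks' : List String)
    (h : ∀ s, ks.any (fun x => x == s) = ks'.any (fun x => x == s)) :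
    ∀ l, fkAvoid ks l = fkAvoid ks' l := by
  intro l
  induction l generalizing ks ks' with
  | nil => rfl
  | cons t rest ih =>
    simp only [fkAvoid, h (altSortKey t)]
    split
    · exact ih ks ks' h
    · refine congrArg _ (ih _ _ ?_)
      intro s; simp [List.any_cons, h s]

theorem dict_fold_items (l : List String) : ∀ (d : PySem.Dict String String),
    (l.foldl (fun (d : PySem.Dict String String) t =>
      let k := altSortKey t
      if !(d.contains k) then d.insert k t else d) d).items
    = d.items ++ (fkAvoid (d.items.map Prod.fst) l).map (fun t => (altSortKey t, t)) := by
  induction l with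
  | nil => intro d; simp [fkAvoid]
  | cons t rest ih =>
    intro d
    have hc : d.contains (altSortKey t) = (d.items.map Prod.fst).any (fun s => s == altSortKey t) := by
      rw [PySem.Dict.contains, List.any_map]; rfl
    rw [List.foldl_cons]
    by_cases h : d.contains (altSortKey t) = true
    · have hstep : (let k := altSortKey t;
          if (!d.contains k) = true then d.insert k t else d) = d := by
        simp [h]
      rw [hstep, ih d, fkAvoid, if_pos (hc ▸ h)]
    · have h' : d.contains (altSortKey t) = false := Bool.eq_false_iff.mpr h
      have hstep : (let k := altSortKey t;
          if (!d.contains k) = true then d.insert k t else d)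
          = PySem.Dict.mk (d.items ++ [(altSortKey t, t)]) := by
        simp [PySem.Dict.insert, h']
      rw [hstep, ih _, fkAvoid, if_neg (by rw [← hc]; simp [h'])]
      rw [fkAvoid_congr ((d.items ++ [(altSortKey t, t)]).map Prod.fst)
            (altSortKey t :: d.items.map Prod.fst)
            (fun s => by simp [List.any_append, Bool.or_comm]) rest]
      simp

theorem dict_fold_values (l : List String) :
    (l.foldl (fun (d : PySem.Dict String String) t =>
      let k := altSortKey t
      if !(d.contains k) then d.insert k t else d) (PySem.Dict.mk [])).values
    = fkAvoid [] l := by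
  rw [PySem.Dict.values, dict_fold_items l ⟨[]⟩]
  simp [Function.comp_def]


theorem mem_fkAvoid (y : String) : ∀ (l ks : List String),
    (y ∈ fkAvoid ks l ↔ ks.any (fun s => s == altSortKey y) = false ∧
      (l.filter (fun z => altSortKey z == altSortKey y)).head? = some y) := by
  intro l
  induction l with
  | nil => intro ks; simp [fkAvoid]
  | cons t rest ih =>
    intro ks
    by_cases hk : altSortKey t = altSortKey y
    · rw [fkAvoid, hk]
      by_cases hks : ks.any (fun s => s == altSortKey y) = true
      · rw [if_pos hks, ih ks]
        simp [hks]
      · have hks' : ks.any (fun s => s == altSortKey y) = false := Bool.eq_false_iff.mpr hks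
        rw [if_neg (by simp [hks'])]
        rw [List.filter_cons, if_pos (by simp [hk]), List.head?_cons]
        constructor
        · intro h
          rcases List.mem_cons.mp h with h | h
          · exact ⟨hks', by rw [h]⟩
          · rcases (ih _).mp h with ⟨h1, _⟩
            simp at h1
        · rintro ⟨_, h2⟩
          exact List.mem_cons.mpr (Or.inl (Option.some.inj h2).symm)
    · have hne : (altSortKey t == altSortKey y) = false := by simp [hk]
      have hfil : (t :: rest).filter (fun z => altSortKey z == altSortKey y)
          = rest.filter (fun z => altSortKey z == altSortKey y) := by
        rw [List.filter_cons, if_neg (by simp [hne])]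
      rw [fkAvoid, hfil]
      by_cases hks : ks.any (fun s => s == altSortKey t) = true
      · rw [if_pos hks, ih ks]
      · rw [if_neg hks]
        constructor
        · intro h
          rcases List.mem_cons.mp h with h | h
          · exact absurd (congrArg altSortKey h.symm) hk
          · rcases (ih _).mp h with ⟨h1, h2⟩
            simp only [List.any_cons] at h1
            exact ⟨(Bool.or_eq_false_iff.mp h1).2, h2⟩
        · rintro ⟨h1, h2⟩
          refine List.mem_cons.mpr (Or.inr ((ih _).mpr ⟨?_, h2⟩))
          simp [List.any_cons, h1, hk]

theorem nodup_fkAvoid : ∀ (l ks : List String), (fkAvoid ks l).Nodup := by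
  intro l
  induction l with
  | nil => intro ks; simp [fkAvoid]
  | cons t rest ih =>
    intro ks
    rw [fkAvoid]
    split
    · exact ih ks
    · refine List.nodup_cons.mpr ⟨?_, ih _⟩
      intro hmem
      rcases (mem_fkAvoid t rest _).mp hmem with ⟨h1, _⟩
      simp at h1


theorem collapseFirsts_subset {y : String} : ∀ (l : List String) (prev : Option String),
    y ∈ collapseFirsts prev l → y ∈ l := by
  intro l
  induction l with
  | nil => intro prev h; simp [collapseFirsts] at h
  | cons t rest ih =>
    intro prev h
    rw [collapseFirsts] at h
    by_cases hp : prev = some (altSortKey t)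
    · rw [if_pos hp] at h
      exact List.mem_cons_of_mem _ (ih _ h)
    · rw [if_neg hp] at h
      rcases List.mem_cons.mp h with h | h
      · exact h ▸ List.mem_cons_self
      · exact List.mem_cons_of_mem _ (ih _ h)

theorem mem_collapseFirsts (y : String) : ∀ (l : List String) (prev : Option String),
    l.Pairwise (fun a b => altSortKey a ≤ altSortKey b) →
    (∀ k, prev = some k → ∀ z ∈ l, k ≤ altSortKey z) →
    (y ∈ collapseFirsts prev l ↔ prev ≠ some (altSortKey y) ∧
      (l.filter (fun z => altSortKey z == altSortKey y)).head? = some y) := by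
  intro l
  induction l with
  | nil =>
    intro prev _ _
    simp only [collapseFirsts, List.filter_nil, List.head?_nil, List.not_mem_nil, false_iff]
    rintro ⟨_, h⟩; cases h
  | cons t rest ih =>
    intro prev hpw hprev
    have hpw' := (List.pairwise_cons.mp hpw).2
    have hhead := (List.pairwise_cons.mp hpw).1
    have hinv : ∀ k, (some (altSortKey t) : Option String) = some k → ∀ z ∈ rest, k ≤ altSortKey z := by
      rintro k hk z hz
      cases Option.some.inj hk
      exact hhead z hz
    rw [collapseFirsts]
    by_cases hk : altSortKey t = altSortKey y
    · have hfil : (t :: rest).filter (fun z => altSortKey z == altSortKey y)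
          = t :: rest.filter (fun z => altSortKey z == altSortKey y) := by
        rw [List.filter_cons, if_pos (by simp [hk])]
      rw [hfil, List.head?_cons]
      by_cases hp : prev = some (altSortKey t)
      · -- skip t
        rw [if_pos hp, ih prev hpw' (fun k hk' z hz => hprev k hk' z (List.mem_cons_of_mem _ hz))]
        rw [hp, hk]
        constructor
        · rintro ⟨h1, _⟩; exact absurd rfl h1
        · rintro ⟨h1, _⟩; exact absurd rfl h1
      · rw [if_neg hp]
        constructor
        · intro h
          rcases List.mem_cons.mp h with h | h
          · refine ⟨by rw [← hk]; exact hp, by rw [h]⟩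
          · rcases (ih (some (altSortKey t)) hpw' hinv).mp h with ⟨h1, _⟩
            exact absurd (congrArg some hk) h1
        · rintro ⟨_, h2⟩
          exact List.mem_cons.mpr (Or.inl (Option.some.inj h2).symm)
    · have hfil : (t :: rest).filter (fun z => altSortKey z == altSortKey y)
          = rest.filter (fun z => altSortKey z == altSortKey y) := by
        rw [List.filter_cons, if_neg (by simp [hk])]
      rw [hfil]
      by_cases hp : prev = some (altSortKey t)
      · rw [if_pos hp, ih prev hpw' (fun k hk' z hz => hprev k hk' z (List.mem_cons_of_mem _ hz))]
      · rw [if_neg hp]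
        have hmemiff := ih (some (altSortKey t)) hpw' hinv
        constructor
        · intro h
          rcases List.mem_cons.mp h with h | h
          · exact absurd (congrArg altSortKey h.symm) hk
          · rcases hmemiff.mp h with ⟨h1, h2⟩
            refine ⟨?_, h2⟩
            intro hpe
            have hle : altSortKey y ≤ altSortKey t := hprev _ hpe t List.mem_cons_self
            have hlt : altSortKey y < altSortKey t := lt_of_le_of_ne hle (fun e => hk e.symm)
            have hymem : y ∈ rest.filter (fun z => altSortKey z == altSortKey y) :=
              List.mem_of_mem_head? (by rw [h2]; exact rfl)
            have hyrest : y ∈ rest := List.mem_of_mem_filter hymem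
            have : altSortKey t ≤ altSortKey y := hhead y hyrest
            exact absurd rfl (ne_of_lt (lt_of_lt_of_le hlt this))
        · rintro ⟨h1, h2⟩
          refine List.mem_cons.mpr (Or.inr (hmemiff.mpr ⟨?_, h2⟩))
          intro he
          exact hk (Option.some.inj he)

theorem pairwise_collapseFirsts : ∀ (l : List String) (prev : Option String),
    l.Pairwise (fun a b => altSortKey a ≤ altSortKey b) →
    (collapseFirsts prev l).Pairwise (fun a b => altSortKey a < altSortKey b) := by
  intro l
  induction l with
  | nil => intro prev _; simp [collapseFirsts]
  | cons t rest ih =>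
    intro prev hpw
    have hpw' := (List.pairwise_cons.mp hpw).2
    have hhead := (List.pairwise_cons.mp hpw).1
    have hinv : ∀ k, (some (altSortKey t) : Option String) = some k → ∀ z ∈ rest, k ≤ altSortKey z := by
      rintro k hk z hz
      cases Option.some.inj hk
      exact hhead z hz
    rw [collapseFirsts]
    by_cases hp : prev = some (altSortKey t)
    · rw [if_pos hp]
      exact ih prev hpw'
    · rw [if_neg hp]
      refine List.pairwise_cons.mpr ⟨?_, ih _ hpw'⟩
      intro z hz
      have hzrest := collapseFirsts_subset rest _ hz
      have hle := hhead z hzrest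
      rcases (mem_collapseFirsts z rest (some (altSortKey t)) hpw' hinv).mp hz with ⟨h1, _⟩
      refine lt_of_le_of_ne hle ?_
      intro he
      exact h1 (congrArg some he)


theorem filter_insertBy_pos (c : String) (x : String) : ∀ (ys : List String),
    ys.Pairwise (fun a b => altSortKey a ≤ altSortKey b) →
    (altSortKey x == c) = true →
    (PySem.List.insertBy (fun a b => decide (altSortKey a < altSortKey b)) x ys).filter
      (fun z => altSortKey z == c)
    = ys.filter (fun z => altSortKey z == c) ++ [x] := by
  intro ys
  induction ys with
  | nil => intro _ hx; simp [PySem.List.insertBy, hx]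
  | cons y ys ih =>
    intro hys hx
    have hpw' := (List.pairwise_cons.mp hys).2
    have hhead := (List.pairwise_cons.mp hys).1
    rw [PySem.List.insertBy]
    by_cases hlt : altSortKey x < altSortKey y
    · rw [if_pos (by exact decide_eq_true hlt)]
      have hc : altSortKey x = c := by simpa using hx
      have hempty : (y :: ys).filter (fun z => altSortKey z == c) = [] := by
        rw [List.filter_eq_nil_iff]
        intro z hz
        have hyz : altSortKey y ≤ altSortKey z := by
          rcases List.mem_cons.mp hz with h | h
          · exact le_of_eq (congrArg altSortKey h.symm)
          · exact hhead z h
        have hcz : c < altSortKey z := lt_of_lt_of_le (hc ▸ hlt) hyz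
        simp [(ne_of_gt hcz)]
      rw [List.filter_cons, if_pos hx, hempty]
      rfl
    · rw [if_neg (by simpa using hlt)]
      rw [List.filter_cons, List.filter_cons, ih hpw' hx]
      by_cases hy : (altSortKey y == c) = true
      · rw [if_pos hy, if_pos hy]; rfl
      · rw [if_neg hy, if_neg hy]

theorem filter_insertBy_neg (c : String) (x : String) : ∀ (ys : List String),
    (altSortKey x == c) = false →
    (PySem.List.insertBy (fun a b => decide (altSortKey a < altSortKey b)) x ys).filter
      (fun z => altSortKey z == c)
    = ys.filter (fun z => altSortKey z == c) := by
  intro ys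
  induction ys with
  | nil => intro hx; simp [PySem.List.insertBy, hx]
  | cons y ys ih =>
    intro hx
    rw [PySem.List.insertBy]
    by_cases hlt : altSortKey x < altSortKey y
    · rw [if_pos (by exact decide_eq_true hlt)]
      rw [List.filter_cons (x := x), if_neg (by simp [hx])]
    · rw [if_neg (by simpa using hlt)]
      rw [List.filter_cons, List.filter_cons, ih hx]

theorem filter_foldl_insertBy (c : String) : ∀ (l acc : List String),
    acc.Pairwise (fun a b => altSortKey a ≤ altSortKey b) →
    (l.foldl (fun acc x => PySem.List.insertBy (fun a b => decide (altSortKey a < altSortKey b)) x acc) acc).filter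
      (fun z => altSortKey z == c)
    = acc.filter (fun z => altSortKey z == c) ++ l.filter (fun z => altSortKey z == c) := by
  intro l
  induction l with
  | nil => intro acc _; simp
  | cons x l ih =>
    intro acc hacc
    rw [List.foldl_cons, ih _ (PySem.List.insertBy_pairwise_le altSortKey x acc hacc)]
    by_cases hx : (altSortKey x == c) = true
    · rw [filter_insertBy_pos c x acc hacc hx, List.filter_cons, if_pos hx]
      simp
    · have hx' : (altSortKey x == c) = false := Bool.eq_false_iff.mpr hx
      rw [filter_insertBy_neg c x acc hx', List.filter_cons, if_neg (by simp [hx'])]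

theorem sorted_filter_stable (c : String) (l : List String) :
    (PySem.List.sorted l altSortKey).filter (fun z => altSortKey z == c)
    = l.filter (fun z => altSortKey z == c) := by
  rw [PySem.List.sorted_eq_foldl_insertBy]
  simpa using filter_foldl_insertBy c l [] (by simp)

-- ===== VERDICT (by name: the statement is the Claim_ definition above) =====
theorem join_sorted_alternation_py_spec : Claim_equal_join_sorted_alternation_py := by
  intro tokens _
  unfold Spec_join_sorted_alternation_py join_sorted_alternation_py join_sorted_alternation_py_alt
  simp only
  set toks := (tokens.map PySem.Str.strip).filter (fun t => t != "") with htoks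
  refine congrArg (PySem.Str.join "|") ?_
  rw [dict_fold_values toks]
  have hS := PySem.List.sorted_pairwise toks altSortKey
  have hmemC := fun (y : String) => mem_collapseFirsts y (PySem.List.sorted toks altSortKey) none hS
    (fun k hk' => by cases hk')
  refine PySem.List.sorted_eq_of_perm_of_pairwise_lt _ _ _ ?_ ?_
  · refine (List.perm_ext_iff_of_nodup ?_ ?_).mpr ?_
    · exact (pairwise_collapseFirsts _ none hS).imp
        (fun h e => absurd (congrArg altSortKey e) (ne_of_lt h))
    · exact nodup_fkAvoid toks []
    · intro y
      rw [hmemC y, mem_fkAvoid y toks [], sorted_filter_stable (altSortKey y) toks]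
      simp
  · exact pairwise_collapseFirsts _ none hS
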